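-- pv_equiv track=rewrite | github.com/neel-banga/NeelFish | minimax.py | reorder_moves
-- ===== SOURCE A (Python) =====
-- def reorder_moves(board, moves):
--
--     # The reason I go from 0 to 9 is because it's most likely most moves will be no captures and pawn captures
--     # This will make the program faster as the rest of the statements are elif statements
--
--     nine_list = []
--     five_list = []
--     three_list = []
--     one_list = []
--     zero_list = []
--
--     for move in moves:
--         if board[move[1][0]][move[1][1]] == 0:
--             zero_list.append(move)
--         elif board[move[1][0]][move[1][1]] == 1:
--             one_list.append(move)
--         elif board[move[1][0]][move[1][1]] == 3:
--             three_list.append(move)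
--         elif board[move[1][0]][move[1][1]] == 5:
--             five_list.append(move)
--         elif board[move[1][0]][move[1][1]] == 9:
--             nine_list.append(move)
--
--     new_moves = nine_list + five_list + three_list + one_list + zero_list
--     return new_moves
-- ===== SOURCE B (Python) =====
-- def reorder_moves(board, moves):
--     return [m for v in (9, 5, 3, 1, 0) for m in moves if board[m[1][0]][m[1][1]] == v]
-- ===== Notes on version B (the rewrite author's own statement) =====
-- stated objective: simpler
-- what changed: Replaces the five explicit accumulator lists and the elif chain with a single comprehension that walks the priority sequence (9,5,3,1,0) and collects, per priority value, the moves capturing that value (stable nested passes instead of one bucketing pass).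
import Mathlib
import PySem

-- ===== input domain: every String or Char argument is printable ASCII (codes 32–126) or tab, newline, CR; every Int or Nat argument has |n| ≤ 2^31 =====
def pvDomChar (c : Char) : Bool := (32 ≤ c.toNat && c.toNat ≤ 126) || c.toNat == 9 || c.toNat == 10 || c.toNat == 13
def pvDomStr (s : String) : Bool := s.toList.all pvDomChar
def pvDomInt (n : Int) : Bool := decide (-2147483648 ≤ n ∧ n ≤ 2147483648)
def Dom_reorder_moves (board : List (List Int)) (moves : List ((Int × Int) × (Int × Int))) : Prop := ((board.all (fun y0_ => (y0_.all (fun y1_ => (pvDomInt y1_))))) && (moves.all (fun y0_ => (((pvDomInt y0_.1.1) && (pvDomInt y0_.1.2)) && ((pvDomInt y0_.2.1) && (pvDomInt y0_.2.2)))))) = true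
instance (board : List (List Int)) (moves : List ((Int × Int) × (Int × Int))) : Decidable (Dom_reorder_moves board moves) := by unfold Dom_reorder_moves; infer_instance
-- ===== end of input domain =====

-- B replaces the five accumulator lists and the elif chain with a single comprehension over the priority sequence (9,5,3,1,0): simpler, same cost.


-- ===== PORT A =====
-- one pass over moves, appending each move to one of five bucket lists, then concatenating the buckets
def reorder_moves (board : List (List Int)) (moves : List ((Int × Int) × (Int × Int))) : List ((Int × Int) × (Int × Int)) :=
  let st := moves.foldl (fun (st : List ((Int × Int) × (Int × Int)) × List ((Int × Int) × (Int × Int)) × List ((Int × Int) × (Int × Int)) × List ((Int × Int) × (Int × Int)) × List ((Int × Int) × (Int × Int))) move =>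
    let v := PySem.List.pyGetD (PySem.List.pyGetD board move.2.1 []) move.2.2 0
    if v = 0 then (st.1, st.2.1, st.2.2.1, st.2.2.2.1, st.2.2.2.2 ++ [move])
    else if v = 1 then (st.1, st.2.1, st.2.2.1, st.2.2.2.1 ++ [move], st.2.2.2.2)
    else if v = 3 then (st.1, st.2.1, st.2.2.1 ++ [move], st.2.2.2.1, st.2.2.2.2)
    else if v = 5 then (st.1, st.2.1 ++ [move], st.2.2.1, st.2.2.2.1, st.2.2.2.2)
    else if v = 9 then (st.1 ++ [move], st.2.1, st.2.2.1, st.2.2.2.1, st.2.2.2.2)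
    else st) ([], [], [], [], [])
  st.1 ++ st.2.1 ++ st.2.2.1 ++ st.2.2.2.1 ++ st.2.2.2.2

-- ===== PORT B =====
-- single comprehension: for each priority value in order, the moves capturing that value
def reorder_moves_alt (board : List (List Int)) (moves : List ((Int × Int) × (Int × Int))) : List ((Int × Int) × (Int × Int)) :=
  [(9 : Int), 5, 3, 1, 0].flatMap (fun v =>
    moves.filter (fun m => PySem.List.pyGetD (PySem.List.pyGetD board m.2.1 []) m.2.2 0 == v))

-- ===== PRECONDITION & SPEC =====
-- Pre_: both board indexings of every move are in range (Python raises IndexError otherwise)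
def Pre_reorder_moves (board : List (List Int)) (moves : List ((Int × Int) × (Int × Int))) : Prop :=
  ∀ m ∈ moves, PySem.Raise.InRange board.length m.2.1 ∧
    PySem.Raise.InRange (PySem.List.pyGetD board m.2.1 []).length m.2.2
instance (board : List (List Int)) (moves : List ((Int × Int) × (Int × Int))) : Decidable (Pre_reorder_moves board moves) := by unfold Pre_reorder_moves; infer_instance
def pvWitness_reorder_moves : List (List Int) × (List ((Int × Int) × (Int × Int))) :=
  ([[0, 9], [3, 1]], [((0, 0), (0, 1)), ((0, 0), (1, 0)), ((1, 1), (0, 0)), ((0, 1), (1, 1))])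
def Spec_reorder_moves (board : List (List Int)) (moves : List ((Int × Int) × (Int × Int))) (out : List ((Int × Int) × (Int × Int))) : Prop := out = reorder_moves_alt board moves
instance (board : List (List Int)) (moves : List ((Int × Int) × (Int × Int))) (out : List ((Int × Int) × (Int × Int))) : Decidable (Spec_reorder_moves board moves out) := by unfold Spec_reorder_moves; infer_instance

-- ===== CLAIM (what is proved, stated in full; the proofs are below) =====
def Claim_equal_reorder_moves : Prop := ∀ (board : List (List Int)) (moves : List ((Int × Int) × (Int × Int))), Dom_reorder_moves board moves → Pre_reorder_moves board moves → Spec_reorder_moves board moves (reorder_moves board moves)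

-- ===== LEMMAS AND PROOFS =====

-- the bucketing fold computes, in each component, the start accumulator followed by the moves of that captured value
theorem reorder_moves_fold (board : List (List Int)) (moves : List ((Int × Int) × (Int × Int)))
    (a b c d e : List ((Int × Int) × (Int × Int))) :
    moves.foldl (fun (st : List ((Int × Int) × (Int × Int)) × List ((Int × Int) × (Int × Int)) × List ((Int × Int) × (Int × Int)) × List ((Int × Int) × (Int × Int)) × List ((Int × Int) × (Int × Int))) move =>
      let v := PySem.List.pyGetD (PySem.List.pyGetD board move.2.1 []) move.2.2 0
      if v = 0 then (st.1, st.2.1, st.2.2.1, st.2.2.2.1, st.2.2.2.2 ++ [move])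
      else if v = 1 then (st.1, st.2.1, st.2.2.1, st.2.2.2.1 ++ [move], st.2.2.2.2)
      else if v = 3 then (st.1, st.2.1, st.2.2.1 ++ [move], st.2.2.2.1, st.2.2.2.2)
      else if v = 5 then (st.1, st.2.1 ++ [move], st.2.2.1, st.2.2.2.1, st.2.2.2.2)
      else if v = 9 then (st.1 ++ [move], st.2.1, st.2.2.1, st.2.2.2.1, st.2.2.2.2)
      else st) (a, b, c, d, e) =
    (a ++ moves.filter (fun m => PySem.List.pyGetD (PySem.List.pyGetD board m.2.1 []) m.2.2 0 == 9),
     b ++ moves.filter (fun m => PySem.List.pyGetD (PySem.List.pyGetD board m.2.1 []) m.2.2 0 == 5),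
     c ++ moves.filter (fun m => PySem.List.pyGetD (PySem.List.pyGetD board m.2.1 []) m.2.2 0 == 3),
     d ++ moves.filter (fun m => PySem.List.pyGetD (PySem.List.pyGetD board m.2.1 []) m.2.2 0 == 1),
     e ++ moves.filter (fun m => PySem.List.pyGetD (PySem.List.pyGetD board m.2.1 []) m.2.2 0 == 0)) := by
  induction moves generalizing a b c d e with
  | nil => simp
  | cons m ms ih =>
    simp only [List.foldl_cons, List.filter_cons]
    by_cases h0 : PySem.List.pyGetD (PySem.List.pyGetD board m.2.1 []) m.2.2 0 = 0 <;>
      by_cases h1 : PySem.List.pyGetD (PySem.List.pyGetD board m.2.1 []) m.2.2 0 = 1 <;>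
      by_cases h3 : PySem.List.pyGetD (PySem.List.pyGetD board m.2.1 []) m.2.2 0 = 3 <;>
      by_cases h5 : PySem.List.pyGetD (PySem.List.pyGetD board m.2.1 []) m.2.2 0 = 5 <;>
      by_cases h9 : PySem.List.pyGetD (PySem.List.pyGetD board m.2.1 []) m.2.2 0 = 9 <;>
      simp [h0, h1, h3, h5, h9, ih]

-- ===== VERDICT (by name: the statement is the Claim_ definition above) =====
theorem reorder_moves_spec : Claim_equal_reorder_moves := by
  intro board moves _ _
  unfold Spec_reorder_moves reorder_moves reorder_moves_alt
  rw [reorder_moves_fold]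
  simp [List.flatMap]
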